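-- pv_equiv track=rewrite | github.com/CodeTemka/e2e-fraud-detection.v3 | src/fraud_detection/registry/prod_model.py | _normalize_experiments
-- ===== SOURCE A (Python) =====
-- from typing import Iterable, Sequence
--
-- def _normalize_experiments(experiments: Sequence[str] | None) -> list[str] | None:
--     if not experiments:
--         return None
--     cleaned: list[str] = []
--     for item in experiments:
--         if not item:
--             continue
--         for part in str(item).split(","):
--             name = part.strip()
--             if name:
--                 cleaned.append(name)
--     return cleaned or None
-- ===== SOURCE B (Python) =====
-- from typing import Iterable, Sequence
--
-- def _normalize_experiments(experiments: "Sequence[str] | None") -> "list[str] | None":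
--     if not experiments:
--         return None
--     cleaned: list[str] = []
--     for item in experiments:
--         if not item:
--             continue
--         # single character-level pass: a streaming tokenizer with a pending
--         # whitespace buffer replaces split(",") + strip()
--         token: list[str] = []
--         pending: list[str] = []
--         for ch in str(item):
--             if ch == ",":
--                 if token:
--                     cleaned.append("".join(token))
--                 token = []
--                 pending = []
--             elif ch.isspace():
--                 if token:
--                     pending.append(ch)
--             else:
--                 token.extend(pending)
--                 pending = []
--                 token.append(ch)
--         if token:
--             cleaned.append("".join(token))
--     return cleaned or None
-- ===== Notes on version B (the rewrite author's own statement) =====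
-- stated objective: alternative
-- what changed: Replaces A's split(",")-then-strip() per item by a single character-level streaming tokenizer: one pass over each item's characters with a token buffer and a pending-whitespace buffer, emitting tokens at commas and item ends; no split/strip/join calls.
import Mathlib
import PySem

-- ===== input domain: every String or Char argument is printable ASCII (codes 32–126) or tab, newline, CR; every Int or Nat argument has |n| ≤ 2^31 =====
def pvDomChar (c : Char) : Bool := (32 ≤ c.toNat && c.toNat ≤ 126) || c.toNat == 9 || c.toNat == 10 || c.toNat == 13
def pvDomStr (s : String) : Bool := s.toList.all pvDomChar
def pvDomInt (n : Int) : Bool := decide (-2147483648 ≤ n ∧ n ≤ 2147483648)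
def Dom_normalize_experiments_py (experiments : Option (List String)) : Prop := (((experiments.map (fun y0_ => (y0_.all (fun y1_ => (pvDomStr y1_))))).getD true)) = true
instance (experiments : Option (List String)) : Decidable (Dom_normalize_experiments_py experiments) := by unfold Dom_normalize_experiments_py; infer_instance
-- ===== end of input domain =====

-- B replaces A's split(",")-then-strip() per item by a single character-level streaming
-- tokenizer (token buffer + pending-whitespace buffer); objective: alternative algorithm.

-- ===== PORT A =====
def normalize_experiments_py (experiments : Option (List String)) : Option (List String) :=
  match experiments with
  | none => none
  | some xs =>
    if xs = [] then none
    else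
      let cleaned : List String := xs.foldl (fun cleaned item =>
        if item = "" then cleaned
        else (PySem.Chars.splitOn item.toList [',']).foldl (fun cleaned part =>
          let name := PySem.Chars.strip part
          if name = [] then cleaned else cleaned ++ [String.ofList name]) cleaned) []
      if cleaned = [] then none else some cleaned

-- ===== PORT B =====
-- streaming tokenizer: state = (remaining chars, token buffer, pending whitespace, output)
def pvTokenize : List Char → List Char → List Char → List String → List String
  | [], token, _pending, cleaned =>
      if token = [] then cleaned else cleaned ++ [String.ofList token]
  | c :: rest, token, pending, cleaned =>
      if c = ',' then
        pvTokenize rest [] [] (if token = [] then cleaned else cleaned ++ [String.ofList token])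
      else if PySem.Chars.isspace c then
        pvTokenize rest token (if token = [] then pending else pending ++ [c]) cleaned
      else
        pvTokenize rest (token ++ pending ++ [c]) [] cleaned

def normalize_experiments_py_alt (experiments : Option (List String)) : Option (List String) :=
  match experiments with
  | none => none
  | some xs =>
    if xs = [] then none
    else
      let cleaned : List String := xs.foldl (fun cleaned item =>
        if item = "" then cleaned else pvTokenize item.toList [] [] cleaned) []
      if cleaned = [] then none else some cleaned

-- ===== PRECONDITION & SPEC =====
def Spec_normalize_experiments_py (experiments : Option (List String)) (out : Option (List String)) : Prop := out = normalize_experiments_py_alt experiments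
instance (experiments : Option (List String)) (out : Option (List String)) : Decidable (Spec_normalize_experiments_py experiments out) := by unfold Spec_normalize_experiments_py; infer_instance

-- ===== CLAIM =====
def Claim_equal_normalize_experiments_py : Prop := ∀ (experiments : Option (List String)), Dom_normalize_experiments_py experiments → Spec_normalize_experiments_py experiments (normalize_experiments_py experiments)

-- ===== LEMMAS AND PROOFS =====

-- the post-processing both sides conceptually apply to a list of raw parts
def pvClean (ps : List (List Char)) : List String :=
  ((ps.map PySem.Chars.strip).filter (fun name => name ≠ [])).map String.ofList

theorem pvClean_append (ps qs : List (List Char)) : pvClean (ps ++ qs) = pvClean ps ++ pvClean qs := by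
  simp [pvClean]

theorem pvClean_cons (x : List Char) (tl : List (List Char)) :
    pvClean (x :: tl)
      = (if PySem.Chars.strip x = [] then [] else [String.ofList (PySem.Chars.strip x)]) ++ pvClean tl := by
  by_cases h : PySem.Chars.strip x = [] <;> simp [pvClean, h]

-- PySem's fuel-based splitOn on the single-char separator [','] is Mathlib's List.splitOn ','
theorem splitOn_go_comma (fuel : Nat) (l cur : List Char) (acc : List (List Char))
    (h : l.length < fuel) :
    PySem.Chars.splitOn.go [','] fuel l cur acc
      = acc.reverse ++ (l.splitOn ',').modifyHead (fun t => cur.reverse ++ t) := by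
  induction fuel generalizing l cur acc with
  | zero => omega
  | succ fuel ih =>
    cases l with
    | nil =>
      simp [PySem.Chars.splitOn.go, List.splitOn, List.splitOnP_nil, List.modifyHead]
    | cons c rest =>
      rw [PySem.Chars.splitOn.go]
      by_cases hc : c = ','
      · subst hc
        have hp : List.isPrefixOf [','] (',' :: rest) = true := by
          simp [List.isPrefixOf]
        simp only [hp, if_true, List.length_cons, List.length_nil, List.drop_succ_cons,
          List.drop_zero]
        rw [ih rest [] (cur.reverse :: acc) (by simpa using Nat.lt_of_succ_lt_succ h)]
        simp [List.splitOn, List.splitOnP_cons]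
        cases List.splitOnP (fun x => x == ',') rest <;> rfl
      · have hp : List.isPrefixOf [','] (c :: rest) = false := by
          simp [List.isPrefixOf]
          exact fun hh => hc hh.symm
        simp only [hp]
        rw [if_neg (by simp), ih rest (c :: cur) acc (by simpa using Nat.lt_of_succ_lt_succ h)]
        have hmh : (rest.splitOn ',').modifyHead (fun t => cur.reverse ++ (c :: t))
             = ((c :: rest).splitOn ',').modifyHead (fun t => cur.reverse ++ t) := by
          simp only [List.splitOn, List.splitOnP_cons]
          rw [if_neg (by simp; exact fun hh => hc hh)]
          cases hsp : List.splitOnP (fun x => x == ',') rest <;> simp [List.modifyHead]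
        simp only [List.reverse_cons, List.append_assoc, List.singleton_append]
        rw [hmh]

theorem chars_splitOn_comma (s : List Char) : PySem.Chars.splitOn s [','] = s.splitOn ',' := by
  rw [PySem.Chars.splitOn, splitOn_go_comma _ _ _ _ (Nat.lt_succ_self _)]
  cases h : s.splitOn ',' with
  | nil => simp
  | cons a t => simp [List.modifyHead]

theorem splitOn_cons_self (rest : List Char) :
    (',' :: rest).splitOn ',' = [] :: rest.splitOn ',' := by
  simp [List.splitOn, List.splitOnP_cons]

theorem splitOn_cons_ne (c : Char) (rest : List Char) (hc : c ≠ ',') :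
    (c :: rest).splitOn ',' = (rest.splitOn ',').modifyHead (fun t => c :: t) := by
  simp only [List.splitOn, List.splitOnP_cons]
  rw [if_neg (by simp; exact fun hh => hc hh)]

theorem splitOn_ne_nil (s : List Char) : s.splitOn ',' ≠ [] :=
  List.splitOnP_ne_nil _ s

theorem modifyHead_modifyHead {α : Type} (f g : α → α) (l : List α) :
    (l.modifyHead g).modifyHead f = l.modifyHead (fun x => f (g x)) := by
  cases l <;> rfl

theorem modifyHead_congr {α : Type} (f g : α → α) (l : List α) (h : ∀ x, f x = g x) :
    l.modifyHead f = l.modifyHead g := by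
  cases l <;> simp [h]

-- strip basics
theorem rstrip_append_ws (a : List Char) (c : Char) (hc : PySem.Chars.isspace c = true) :
    PySem.Chars.rstrip (a ++ [c]) = PySem.Chars.rstrip a := by
  simp [PySem.Chars.rstrip, List.dropWhile, hc]

theorem strip_append_ws (a : List Char) (c : Char) (hc : PySem.Chars.isspace c = true) :
    PySem.Chars.strip (a ++ [c]) = PySem.Chars.strip a := by
  simp only [PySem.Chars.strip, PySem.Chars.lstrip]
  rw [List.dropWhile_append]
  by_cases h : (a.dropWhile PySem.Chars.isspace).isEmpty
  · rw [if_pos h]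
    have : a.dropWhile PySem.Chars.isspace = [] := by simpa [List.isEmpty_iff] using h
    simp [this, List.dropWhile, hc, PySem.Chars.rstrip]
  · rw [if_neg h]
    exact rstrip_append_ws _ _ hc

theorem strip_cons_ws (a : List Char) (c : Char) (hc : PySem.Chars.isspace c = true) :
    PySem.Chars.strip (c :: a) = PySem.Chars.strip a := by
  simp [PySem.Chars.strip, PySem.Chars.lstrip, List.dropWhile, hc]

theorem dropWhile_cons_not {α : Type} (p : α → Bool) (x : List α) (h : α) (z : List α)
    (hx : x.dropWhile p = h :: z) : p h = false := by
  induction x with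
  | nil => simp at hx
  | cons c cs ih =>
    by_cases hp : p c
    · exact ih (by simpa [List.dropWhile, hp] using hx)
    · rw [List.dropWhile_cons_of_neg (by simpa using hp)] at hx
      cases hx
      simpa using hp

-- the head of a nonempty strip result is never whitespace
theorem strip_head_not (x : List Char) (h : Char) (t : List Char)
    (hx : PySem.Chars.strip x = h :: t) : PySem.Chars.isspace h = false := by
  simp only [PySem.Chars.strip, PySem.Chars.rstrip] at hx
  obtain ⟨pre, hpre⟩ := (List.dropWhile_suffix (l := (PySem.Chars.lstrip x).reverse)
    (p := PySem.Chars.isspace))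
  have hy : PySem.Chars.lstrip x
      = ((PySem.Chars.lstrip x).reverse.dropWhile PySem.Chars.isspace).reverse ++ pre.reverse := by
    have h' := congrArg List.reverse hpre
    simp at h'
    exact h'.symm
  rw [hx] at hy
  exact dropWhile_cons_not PySem.Chars.isspace x h (t ++ pre.reverse)
    (by simpa [PySem.Chars.lstrip] using hy)

theorem strip_fix_cons (h : Char) (rest : List Char) (c : Char)
    (hh : PySem.Chars.isspace h = false) (hc : PySem.Chars.isspace c = false) :
    PySem.Chars.strip (h :: rest ++ [c]) = h :: rest ++ [c] := by
  have hl : PySem.Chars.lstrip (h :: rest ++ [c]) = h :: rest ++ [c] := by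
    simp [PySem.Chars.lstrip, List.dropWhile, hh]
  simp only [PySem.Chars.strip, hl, PySem.Chars.rstrip]
  simp [List.dropWhile, hc]

theorem strip_single (c : Char) (hc : PySem.Chars.isspace c = false) :
    PySem.Chars.strip [c] = [c] := by
  simp [PySem.Chars.strip, PySem.Chars.lstrip, PySem.Chars.rstrip, List.dropWhile, hc]

-- main tokenizer characterisation
theorem tokenize_eq (l : List Char) (token pending : List Char) (cleaned : List String)
    (h1 : PySem.Chars.strip (token ++ pending) = token)
    (h2 : token = [] → pending = []) :
    pvTokenize l token pending cleaned
      = cleaned ++ pvClean ((l.splitOn ',').modifyHead (fun t => token ++ pending ++ t)) := by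
  induction l generalizing token pending cleaned with
  | nil =>
    have : ([] : List Char).splitOn ',' = [[]] := by simp [List.splitOn, List.splitOnP_nil]
    rw [this]
    simp only [List.modifyHead, List.append_nil]
    rw [pvClean_cons, h1]
    by_cases ht : token = [] <;> simp [pvTokenize, ht, pvClean]
  | cons c rest ih =>
    by_cases hc : c = ','
    · subst hc
      rw [splitOn_cons_self]
      simp only [pvTokenize, if_pos rfl, List.modifyHead, List.append_nil]
      rw [ih [] [] _ (by simp [PySem.Chars.strip, PySem.Chars.lstrip, PySem.Chars.rstrip]) (fun _ => rfl)]
      rw [pvClean_cons, h1]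
      have hid : (rest.splitOn ',').modifyHead (fun t => [] ++ [] ++ t) = rest.splitOn ',' := by
        cases rest.splitOn ',' <;> rfl
      rw [hid]
      by_cases ht : token = [] <;> simp [ht]
    · by_cases hs : PySem.Chars.isspace c
      · -- whitespace character
        rw [splitOn_cons_ne c rest hc, modifyHead_modifyHead]
        simp only [pvTokenize, if_neg hc, if_pos hs]
        by_cases ht : token = []
        · have hp := h2 ht
          subst ht; subst hp
          simp only [if_true]
          rw [ih [] [] _ (by simp [PySem.Chars.strip, PySem.Chars.lstrip, PySem.Chars.rstrip]) (fun _ => rfl)]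
          obtain ⟨hhd, htl, hsp⟩ : ∃ hd tl, rest.splitOn ',' = hd :: tl := by
            cases hrs : rest.splitOn ',' with
            | nil => exact absurd hrs (splitOn_ne_nil rest)
            | cons a b => exact ⟨a, b, rfl⟩
          rw [hsp]
          simp only [List.modifyHead, List.nil_append]
          rw [pvClean_cons, pvClean_cons, strip_cons_ws _ _ hs]
        · rw [if_neg ht]
          rw [ih token (pending ++ [c]) _
            (by rw [← List.append_assoc, strip_append_ws (token ++ pending) c hs]; exact h1)
            (fun h => absurd h ht)]
          congr 2
          exact modifyHead_congr _ _ _ (fun t => by simp)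
      · -- ordinary character
        rw [splitOn_cons_ne c rest hc, modifyHead_modifyHead]
        simp only [pvTokenize, if_neg hc, if_neg hs]
        have hinv : PySem.Chars.strip ((token ++ pending ++ [c]) ++ []) = token ++ pending ++ [c] := by
          rw [List.append_nil]
          cases ht : token with
          | nil =>
            have hp := h2 ht
            simp only [ht, hp, List.nil_append]
            exact strip_single c (by simpa using hs)
          | cons h0 t0 =>
            have hh : PySem.Chars.isspace h0 = false := by
              apply strip_head_not (token ++ pending) h0 t0
              rw [h1, ht]
            simpa using strip_fix_cons h0 (t0 ++ pending) c hh (by simpa using hs)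
        rw [ih (token ++ pending ++ [c]) [] _ hinv (by simp)]
        congr 2
        exact modifyHead_congr _ _ _ (fun t => by simp)

-- B's per-item pass produces exactly the cleaned parts of that item's comma-split
theorem tokenize_item (l : List Char) (cleaned : List String) :
    pvTokenize l [] [] cleaned = cleaned ++ pvClean (l.splitOn ',') := by
  rw [tokenize_eq l [] [] cleaned
    (by simp [PySem.Chars.strip, PySem.Chars.lstrip, PySem.Chars.rstrip]) (fun _ => rfl)]
  congr 1
  cases l.splitOn ',' <;> rfl

-- A's inner loop appends exactly pvClean of the parts
theorem innerA (parts : List (List Char)) (cleaned : List String) :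
    parts.foldl (fun cleaned part =>
      let name := PySem.Chars.strip part
      if name = [] then cleaned else cleaned ++ [String.ofList name]) cleaned
    = cleaned ++ pvClean parts := by
  induction parts generalizing cleaned with
  | nil => simp [pvClean]
  | cons p ps ih =>
    simp only [List.foldl_cons]
    by_cases hp : PySem.Chars.strip p = []
    · rw [if_pos hp, ih]
      simp [pvClean, hp]
    · rw [if_neg hp, ih]
      simp [pvClean, hp]

-- A's outer loop appends pvClean of the concatenated splits of the non-empty items
theorem outerA (xs : List String) (acc : List String) :
    xs.foldl (fun cleaned item =>
      if item = "" then cleaned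
      else (PySem.Chars.splitOn item.toList [',']).foldl (fun cleaned part =>
        let name := PySem.Chars.strip part
        if name = [] then cleaned else cleaned ++ [String.ofList name]) cleaned) acc
    = acc ++ pvClean ((xs.filter (fun item => item ≠ "")).flatMap
        (fun item => item.toList.splitOn ',')) := by
  induction xs generalizing acc with
  | nil => simp [pvClean]
  | cons x xs ih =>
    simp only [List.foldl_cons]
    by_cases hx : x = ""
    · rw [if_pos hx, ih]
      simp [hx]
    · rw [if_neg hx, innerA, ih, chars_splitOn_comma]
      simp [hx, pvClean_append]

-- B's outer loop appends the same thing
theorem outerB (xs : List String) (acc : List String) :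
    xs.foldl (fun cleaned item =>
      if item = "" then cleaned else pvTokenize item.toList [] [] cleaned) acc
    = acc ++ pvClean ((xs.filter (fun item => item ≠ "")).flatMap
        (fun item => item.toList.splitOn ',')) := by
  induction xs generalizing acc with
  | nil => simp [pvClean]
  | cons x xs ih =>
    simp only [List.foldl_cons]
    by_cases hx : x = ""
    · rw [if_pos hx, ih]
      simp [hx]
    · rw [if_neg hx, tokenize_item, ih]
      simp [hx, pvClean_append]

-- ===== VERDICT (by name: the statement is the Claim_ definition above) =====
theorem normalize_experiments_py_spec : Claim_equal_normalize_experiments_py := by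
  intro experiments _
  unfold Spec_normalize_experiments_py normalize_experiments_py normalize_experiments_py_alt
  cases experiments with
  | none => rfl
  | some xs =>
    by_cases hxs : xs = []
    · simp [hxs]
    · simp only [if_neg hxs]
      rw [outerA, outerB]
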